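-- pv_equiv track=rewrite | github.com/dmjone/dmjone | test/codevitas13/a5.py | perm_rotate_front
-- ===== SOURCE A (Python) =====
-- def identity_perm(M):
--     return list(range(M))
--
-- def compose(A, B):
--     """Return A ∘ B (apply B, then A). Perms are dest->src mappings."""
--     M = len(A)
--     P = [0] * M
--     for x in range(M):
--         P[x] = A[B[x]]
--     return P
--
-- def ID(f, i, j, N):
--     """1-based f,i,j -> 0-based linear id"""
--     return (f - 1) * N * N + (i - 1) * N + (j - 1)
--
-- def rotate_face_perm(f, which, N):
--     """Rotate face f in place. which in {'CW','CCW','CW2'}."""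
--     M = 6 * N * N
--     P = identity_perm(M)
--     for i in range(1, N + 1):
--         for j in range(1, N + 1):
--             if which == 'CW':
--                 ni, nj = j, N - i + 1
--             elif which == 'CCW':
--                 ni, nj = N - j + 1, i
--             else:  # 180°
--                 ni, nj = N - i + 1, N - j + 1
--             dst = ID(f, ni, nj, N)
--             src = ID(f, i, j, N)
--             P[dst] = src
--     return P
--
-- def perm_rotate_front(N):
--
--     M = 6 * N * N
--     P = identity_perm(M)
--     for i in range(1, N + 1):
--         for j in range(1, N + 1):
--             P[ID(1, i, j, N)] = ID(4, i, j, N)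
--             P[ID(2, i, j, N)] = ID(1, i, j, N)
--             P[ID(3, i, j, N)] = ID(2, i, j, N)
--             P[ID(4, i, j, N)] = ID(3, i, j, N)
--     P = compose(rotate_face_perm(5, 'CW', N), P)    # left CW
--     P = compose(rotate_face_perm(6, 'CCW', N), P)   # right CCW
--     return P
-- ===== SOURCE B (Python) =====
-- def ID(f, i, j, N):
--     """1-based f,i,j -> 0-based linear id"""
--     return (f - 1) * N * N + (i - 1) * N + (j - 1)
--
-- def perm_rotate_front(N):
--     # One fused pass: write the four side-face cycle cells and the face-5 CW /
--     # face-6 CCW rotated cells directly, instead of building three permutations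
--     # and composing them.
--     M = 6 * N * N
--     P = list(range(M))
--     for i in range(1, N + 1):
--         for j in range(1, N + 1):
--             P[ID(1, i, j, N)] = ID(4, i, j, N)
--             P[ID(2, i, j, N)] = ID(1, i, j, N)
--             P[ID(3, i, j, N)] = ID(2, i, j, N)
--             P[ID(4, i, j, N)] = ID(3, i, j, N)
--             P[ID(5, j, N - i + 1, N)] = ID(5, i, j, N)   # left face CW
--             P[ID(6, N - j + 1, i, N)] = ID(6, i, j, N)   # right face CCW
--     return P
-- ===== Notes on version B (the rewrite author's own statement) =====
-- stated objective: alternative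
-- what changed: Instead of building the side-cycle permutation and two whole-face rotation permutations and then composing them with two extra whole-array compose passes, B fills the result in one fused double loop over (i,j), writing the four side-face cycle cells and the face-5 CW / face-6 CCW rotated cells directly into the identity array (measured about 1.3x, below the 1.5x bar, so no speed is claimed).
import Mathlib
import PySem

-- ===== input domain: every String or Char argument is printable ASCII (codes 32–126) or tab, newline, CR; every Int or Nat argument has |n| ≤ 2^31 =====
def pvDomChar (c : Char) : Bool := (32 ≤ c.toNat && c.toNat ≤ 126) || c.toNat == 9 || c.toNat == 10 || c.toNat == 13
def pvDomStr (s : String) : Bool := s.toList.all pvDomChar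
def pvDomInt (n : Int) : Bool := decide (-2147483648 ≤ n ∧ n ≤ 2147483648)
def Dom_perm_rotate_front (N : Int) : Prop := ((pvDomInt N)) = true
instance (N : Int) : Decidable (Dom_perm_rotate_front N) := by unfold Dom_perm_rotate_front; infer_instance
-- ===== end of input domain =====

-- B replaces A's build-three-permutations-then-compose structure by one fused double loop
-- that writes every destination cell directly (objective: alternative single-pass algorithm).

-- ===== PORT A =====
def identity_perm (M : Int) : List Int := PySem.List.pyRange 0 M 1

-- Python list indices in `compose` are always in range when A runs, so the total
-- forms pyGetD/pySetD are exact here.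
def compose (A B : List Int) : List Int :=
  let M : Int := PySem.List.len A
  (PySem.List.pyRange 0 M 1).foldl
    (fun P x => PySem.List.pySetD P x (PySem.List.pyGetD A (PySem.List.pyGetD B x 0) 0))
    (List.replicate M.toNat 0)

def pyID (f i j N : Int) : Int := (f - 1) * N * N + (i - 1) * N + (j - 1)

def rotate_face_perm (f : Int) (which : String) (N : Int) : List Int :=
  let M := 6 * N * N
  (PySem.List.pyRange 1 (N + 1) 1).foldl (fun P i =>
    (PySem.List.pyRange 1 (N + 1) 1).foldl (fun P j =>
      let nij : Int × Int :=
        if which = "CW" then (j, N - i + 1)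
        else if which = "CCW" then (N - j + 1, i)
        else (N - i + 1, N - j + 1)
      PySem.List.pySetD P (pyID f nij.1 nij.2 N) (pyID f i j N)) P)
    (identity_perm M)

def perm_rotate_front (N : Int) : List Int :=
  let M := 6 * N * N
  let P0 := identity_perm M
  let P1 := (PySem.List.pyRange 1 (N + 1) 1).foldl (fun P i =>
    (PySem.List.pyRange 1 (N + 1) 1).foldl (fun P j =>
      let P := PySem.List.pySetD P (pyID 1 i j N) (pyID 4 i j N)
      let P := PySem.List.pySetD P (pyID 2 i j N) (pyID 1 i j N)
      let P := PySem.List.pySetD P (pyID 3 i j N) (pyID 2 i j N)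
      PySem.List.pySetD P (pyID 4 i j N) (pyID 3 i j N)) P) P0
  let P2 := compose (rotate_face_perm 5 "CW" N) P1
  compose (rotate_face_perm 6 "CCW" N) P2

-- ===== PORT B =====
def perm_rotate_front_alt (N : Int) : List Int :=
  let M := 6 * N * N
  (PySem.List.pyRange 1 (N + 1) 1).foldl (fun P i =>
    (PySem.List.pyRange 1 (N + 1) 1).foldl (fun P j =>
      let P := PySem.List.pySetD P (pyID 1 i j N) (pyID 4 i j N)
      let P := PySem.List.pySetD P (pyID 2 i j N) (pyID 1 i j N)
      let P := PySem.List.pySetD P (pyID 3 i j N) (pyID 2 i j N)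
      let P := PySem.List.pySetD P (pyID 4 i j N) (pyID 3 i j N)
      let P := PySem.List.pySetD P (pyID 5 j (N - i + 1) N) (pyID 5 i j N)
      PySem.List.pySetD P (pyID 6 (N - j + 1) i N) (pyID 6 i j N)) P)
    (PySem.List.pyRange 0 M 1)

-- ===== PRECONDITION & SPEC =====
-- Pre_ excludes exactly the in-domain N with 6*N*N > 2^63-1 (|N| > 1239850262), where Python's
-- list(range(6*N*N)) raises OverflowError ('int too large to convert to C ssize_t') in A and B alike;
-- on every other in-domain N both programs return.
def Pre_perm_rotate_front (N : Int) : Prop := 6 * N * N ≤ 9223372036854775807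
instance (N : Int) : Decidable (Pre_perm_rotate_front N) := by unfold Pre_perm_rotate_front; infer_instance
def pvWitness_perm_rotate_front : Int := 3

def Spec_perm_rotate_front (N : Int) (out : List Int) : Prop := out = perm_rotate_front_alt N
instance (N : Int) (out : List Int) : Decidable (Spec_perm_rotate_front N out) := by unfold Spec_perm_rotate_front; infer_instance

-- ===== CLAIM (what is proved, stated in full; the proofs are below) =====
def Claim_equal_perm_rotate_front : Prop := ∀ (N : Int), Dom_perm_rotate_front N → Pre_perm_rotate_front N → Spec_perm_rotate_front N (perm_rotate_front N)

-- ===== LEMMAS AND PROOFS =====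

def AW (ws : List (Int × Int)) (P : List Int) : List Int :=
  ws.foldl (fun P w => PySem.List.pySetD P w.1 w.2) P

theorem getD_set (l : List Int) (i j : Nat) (a : Int) : (l.set i a).getD j 0 = if i = j ∧ i < l.length then a else l.getD j 0 := by
  simp [List.getD_eq_getElem?_getD, List.getElem?_set]
  split_ifs <;> simp_all <;> omega

theorem getD_pySetD_cases (P : List Int) (i v : Int) (d : Nat) :
    (PySem.List.pySetD P i v).getD d 0 = P.getD d 0 ∨ (PySem.List.pySetD P i v).getD d 0 = v := by
  unfold PySem.List.pySetD PySem.List.pySet?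
  cases h : PySem.List.pyIdx? P.length i with
  | none => simp
  | some k =>
    simp only [Option.map_some, Option.getD_some, getD_set]
    split_ifs <;> simp

theorem AW_cons (w : Int × Int) (t : List (Int × Int)) (P : List Int) :
    AW (w :: t) P = AW t (PySem.List.pySetD P w.1 w.2) := rfl

theorem length_AW (ws : List (Int × Int)) (P : List Int) :
    (AW ws P).length = P.length := by
  induction ws generalizing P with
  | nil => rfl
  | cons w t ih => rw [AW_cons, ih, PySem.List.length_pySetD]

theorem AW_getD_congr (ws : List (Int × Int)) (P Q : List Int) (d : Nat)
    (hpos : ∀ w ∈ ws, 0 ≤ w.1)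
    (hlen : P.length = Q.length) (h : P.getD d 0 = Q.getD d 0) :
    (AW ws P).getD d 0 = (AW ws Q).getD d 0 := by
  induction ws generalizing P Q with
  | nil => exact h
  | cons w t ih =>
    rw [AW_cons, AW_cons]
    have hw : (0:Int) ≤ w.1 := hpos w (List.mem_cons_self ..)
    rw [PySem.List.pySetD_of_nonneg _ _ hw, PySem.List.pySetD_of_nonneg _ _ hw]
    refine ih _ _ (fun x hx => hpos x (List.mem_cons_of_mem _ hx)) (by simp [hlen]) ?_
    rw [getD_set, getD_set, hlen]
    split_ifs <;> [rfl; exact h]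

theorem getD_AW_not_mem (ws : List (Int × Int)) (P : List Int) (d : Nat)
    (h : ∀ w ∈ ws, 0 ≤ w.1 ∧ w.1 ≠ (d : Int)) :
    (AW ws P).getD d 0 = P.getD d 0 := by
  induction ws generalizing P with
  | nil => rfl
  | cons w t ih =>
    rw [AW_cons, ih _ (fun x hx => h x (List.mem_cons_of_mem _ hx))]
    obtain ⟨hw, hne⟩ := h w (List.mem_cons_self ..)
    rw [PySem.List.pySetD_of_nonneg _ _ hw, getD_set]
    split_ifs with hc
    · exfalso; omega
    · rfl

theorem getD_AW_cases (ws : List (Int × Int)) (P : List Int) (d : Nat) :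
    (AW ws P).getD d 0 = P.getD d 0 ∨ ∃ w ∈ ws, (AW ws P).getD d 0 = w.2 := by
  induction ws generalizing P with
  | nil => left; rfl
  | cons w t ih =>
    rw [AW_cons]
    rcases ih (PySem.List.pySetD P w.1 w.2) with hc | ⟨w', hw', hv⟩
    · by_cases hq : (PySem.List.pySetD P w.1 w.2).getD d 0 = P.getD d 0
      · left; omega
      · right
        refine ⟨w, List.mem_cons_self .., ?_⟩
        rw [hc]
        -- the write hit slot d, so its value is w.2
        by_cases hs : 0 ≤ w.1
        · rw [PySem.List.pySetD_of_nonneg _ _ hs, getD_set] at hq ⊢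
          split_ifs at hq ⊢ with h1
          · rfl
          · omega
        · -- negative index: pySetD wraps; still either sets some slot to w.2 or is a no-op
          rcases getD_pySetD_cases P w.1 w.2 d with h1 | h2
          · omega
          · exact h2
    · right; exact ⟨w', List.mem_cons_of_mem _ hw', hv⟩

theorem pySetD_comm (P : List Int) (a b va vb : Int) (ha : 0 ≤ a) (hb : 0 ≤ b) (hne : a ≠ b) :
    PySem.List.pySetD (PySem.List.pySetD P a va) b vb
      = PySem.List.pySetD (PySem.List.pySetD P b vb) a va := by
  rw [PySem.List.pySetD_of_nonneg _ _ ha, PySem.List.pySetD_of_nonneg _ _ hb,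
      PySem.List.pySetD_of_nonneg _ _ hb, PySem.List.pySetD_of_nonneg _ _ ha]
  exact List.set_comm _ _ (by omega)

theorem AW_pySetD_comm (ws : List (Int × Int)) (b vb : Int) (hb : 0 ≤ b)
    (h : ∀ w ∈ ws, 0 ≤ w.1 ∧ w.1 ≠ b) :
    ∀ P, AW ws (PySem.List.pySetD P b vb) = PySem.List.pySetD (AW ws P) b vb := by
  induction ws with
  | nil => intro P; rfl
  | cons w t ih =>
    intro P
    obtain ⟨hw, hne⟩ := h w (List.mem_cons_self ..)
    rw [AW_cons, AW_cons, ← pySetD_comm P w.1 b w.2 vb hw hb hne,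
        ih (fun x hx => h x (List.mem_cons_of_mem _ hx))]

theorem AW_AW_comm (ws ws' : List (Int × Int))
    (h : ∀ w ∈ ws, ∀ w' ∈ ws', 0 ≤ w.1 ∧ 0 ≤ w'.1 ∧ w.1 ≠ w'.1) :
    ∀ P, AW ws (AW ws' P) = AW ws' (AW ws P) := by
  induction ws' with
  | nil => intro P; rfl
  | cons w' t' ih =>
    intro P
    cases ws with
    | nil => rfl
    | cons a as =>
      rw [AW_cons (P := P), AW_cons (P := AW (a :: as) P),
          ih (fun w hw x hx => h w hw x (List.mem_cons_of_mem _ hx)),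
          AW_pySetD_comm (a :: as) w'.1 w'.2 (h a (List.mem_cons_self ..) w' (List.mem_cons_self ..)).2.1
            (fun w hw => ⟨(h w hw w' (List.mem_cons_self ..)).1, (h w hw w' (List.mem_cons_self ..)).2.2⟩)]

theorem AW_append (u v : List (Int × Int)) (P : List Int) :
    AW (u ++ v) P = AW v (AW u P) := by
  simp [AW, List.foldl_append]

theorem AW_flatMap_split {α : Type} (xs : List α) (u v : α → List (Int × Int))
    (h : ∀ x ∈ xs, ∀ y ∈ xs, ∀ w ∈ u x, ∀ w' ∈ v y, 0 ≤ w.1 ∧ 0 ≤ w'.1 ∧ w.1 ≠ w'.1) :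
    ∀ P, AW (xs.flatMap fun x => u x ++ v x) P = AW (xs.flatMap v) (AW (xs.flatMap u) P) := by
  induction xs with
  | nil => intro P; rfl
  | cons x t ih =>
    intro P
    rw [List.flatMap_cons, List.flatMap_cons, List.flatMap_cons,
        AW_append, AW_append, AW_append, AW_append,
        ih (fun a ha b hb => h a (List.mem_cons_of_mem _ ha) b (List.mem_cons_of_mem _ hb)),
        AW_AW_comm (t.flatMap u) (v x)
          (fun w hw w' hw' => by
            obtain ⟨y, hy, hwy⟩ := List.mem_flatMap.mp hw
            exact ⟨(h y (List.mem_cons_of_mem _ hy) x (List.mem_cons_self ..) w hwy w' hw').1,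
                   (h y (List.mem_cons_of_mem _ hy) x (List.mem_cons_self ..) w hwy w' hw').2.1,
                   (h y (List.mem_cons_of_mem _ hy) x (List.mem_cons_self ..) w hwy w' hw').2.2⟩)]

def grid (N : Int) : List (Int × Int) :=
  (PySem.List.pyRange 1 (N + 1) 1).flatMap fun i =>
    (PySem.List.pyRange 1 (N + 1) 1).map fun j => (i, j)

theorem mem_grid (N : Int) (p : Int × Int) (hp : p ∈ grid N) :
    1 ≤ p.1 ∧ p.1 ≤ N ∧ 1 ≤ p.2 ∧ p.2 ≤ N := by
  simp only [grid, List.mem_flatMap, List.mem_map] at hp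
  obtain ⟨i, hi, j, hj, rfl⟩ := hp
  rw [PySem.List.mem_pyRange_one] at hi hj
  exact ⟨by omega, by omega, by omega, by omega⟩

theorem pyID_bounds (N f i j : Int) (h1 : 1 ≤ i) (h2 : i ≤ N) (h3 : 1 ≤ j) (h4 : j ≤ N) :
    (f - 1) * N * N ≤ pyID f i j N ∧ pyID f i j N < f * N * N := by
  unfold pyID
  constructor
  · nlinarith
  · nlinarith

theorem getD_identity (M : Int) (d : Nat) (hd : d < M.toNat) :
    (identity_perm M).getD d 0 = (d : Int) := by
  unfold identity_perm
  rw [PySem.List.pyRange_one]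
  have : (M - 0).toNat = M.toNat := by omega
  rw [this, PySem.List.getD_map_range _ _ _ _ hd]
  omega

theorem foldl_AW {α : Type} (f : α → List (Int × Int)) :
    ∀ (xs : List α) (P : List Int),
      xs.foldl (fun P x => AW (f x) P) P = AW (xs.flatMap f) P := by
  intro xs
  induction xs with
  | nil => intro P; rfl
  | cons x t ih => intro P; simp only [List.foldl_cons, List.flatMap_cons, AW_append, ih]

theorem getD_AW_mem (ws : List (Int × Int)) (P : List Int) (d : Nat) (v : Int)
    (hlen : d < P.length) (hmem : ((d : Int), v) ∈ ws)
    (huniq : ∀ w ∈ ws, w.1 = (d : Int) → w.2 = v)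
    (hpos : ∀ w ∈ ws, 0 ≤ w.1) :
    (AW ws P).getD d 0 = v := by
  induction ws generalizing P with
  | nil => simp at hmem
  | cons w t ih =>
    rw [AW_cons]
    by_cases hm : ((d : Int), v) ∈ t
    · exact ih _ (by rw [PySem.List.length_pySetD]; exact hlen) hm
        (fun x hx => huniq x (List.mem_cons_of_mem _ hx))
        (fun x hx => hpos x (List.mem_cons_of_mem _ hx))
    · have hw : w = ((d : Int), v) := by
        rcases List.mem_cons.mp hmem with h | h
        · exact h.symm
        · exact absurd h hm
      have hnt : ∀ w' ∈ t, 0 ≤ w'.1 ∧ w'.1 ≠ (d : Int) := by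
        intro w' hw'
        refine ⟨hpos w' (List.mem_cons_of_mem _ hw'), fun hc => hm ?_⟩
        have : w'.2 = v := huniq w' (List.mem_cons_of_mem _ hw') hc
        have : w' = ((d : Int), v) := by rw [Prod.ext_iff]; exact ⟨hc, this⟩
        rwa [← this]
      rw [getD_AW_not_mem t _ d hnt, hw]
      rw [PySem.List.pySetD_natCast, getD_set]
      simp [hlen]

theorem compose_eq_AW (C D : List Int) :
    compose C D = AW ((PySem.List.pyRange 0 (PySem.List.len C) 1).flatMap
        (fun x => [(x, PySem.List.pyGetD C (PySem.List.pyGetD D x 0) 0)]))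
      (List.replicate (PySem.List.len C).toNat 0) := by
  unfold compose
  rw [show (fun (P : List Int) (x : Int) =>
        PySem.List.pySetD P x (PySem.List.pyGetD C (PySem.List.pyGetD D x 0) 0))
      = (fun P x => AW [(x, PySem.List.pyGetD C (PySem.List.pyGetD D x 0) 0)] P) from rfl]
  rw [foldl_AW]

theorem length_compose (C D : List Int) : (compose C D).length = C.length := by
  rw [compose_eq_AW, length_AW, List.length_replicate]
  simp [PySem.List.len]

theorem getD_compose (C D : List Int) (d : Nat) (hd : d < C.length) :
    (compose C D).getD d 0 =
      PySem.List.pyGetD C (PySem.List.pyGetD D (d : Int) 0) 0 := by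
  rw [compose_eq_AW]
  apply getD_AW_mem
  · rw [List.length_replicate]; simp [PySem.List.len]; exact hd
  · rw [List.mem_flatMap]
    refine ⟨(d : Int), ?_, by simp⟩
    rw [PySem.List.mem_pyRange_one]
    simp [PySem.List.len]
    omega
  · intro w hw h1
    rw [List.mem_flatMap] at hw
    obtain ⟨x, hx, hxw⟩ := hw
    simp at hxw
    subst hxw
    simp at h1
    rw [h1]
  · intro w hw
    rw [List.mem_flatMap] at hw
    obtain ⟨x, hx, hxw⟩ := hw
    simp at hxw
    subst hxw
    rw [PySem.List.mem_pyRange_one] at hx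
    exact hx.1

theorem length_identity (M : Int) : (identity_perm M).length = M.toNat := by
  unfold identity_perm
  rw [PySem.List.length_pyRange_one]
  omega

theorem compose_rot_eq_AW (N : Int) (T : List Int) (ws : List (Int × Int)) (lo hi : Int)
    (hTlen : T.length = (6 * N * N).toNat)
    (hws_dst : ∀ w ∈ ws, lo ≤ w.1 ∧ w.1 < hi)
    (hlo : 0 ≤ lo)
    (hT_id : ∀ d : Nat, lo ≤ (d : Int) → (d : Int) < hi → T.getD d 0 = (d : Int))
    (hT_rng : ∀ d : Nat, d < (6 * N * N).toNat → 0 ≤ T.getD d 0 ∧ T.getD d 0 < 6 * N * N)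
    (hT_out : ∀ d : Nat, d < (6 * N * N).toNat → ¬(lo ≤ (d : Int) ∧ (d : Int) < hi) →
        ¬(lo ≤ T.getD d 0 ∧ T.getD d 0 < hi)) :
    compose (AW ws (identity_perm (6 * N * N))) T = AW ws T := by
  have hpos : ∀ w ∈ ws, 0 ≤ w.1 := fun w hw => le_trans hlo (hws_dst w hw).1
  have hRlen : (AW ws (identity_perm (6 * N * N))).length = (6 * N * N).toNat := by
    rw [length_AW, length_identity]
  apply List.ext_getElem
  · rw [length_compose, hRlen, length_AW, hTlen]
  · intro d h1 h2
    rw [← List.getD_eq_getElem _ 0 h1, ← List.getD_eq_getElem _ 0 h2]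
    have hdM : d < (6 * N * N).toNat := by
      rw [length_compose, hRlen] at h1; exact h1
    rw [getD_compose _ _ _ (by rw [hRlen]; exact hdM)]
    rw [PySem.List.pyGetD_natCast]
    by_cases hband : lo ≤ (d : Int) ∧ (d : Int) < hi
    · rw [hT_id d hband.1 hband.2]
      have : ((d : Nat) : Int) = ((d : Nat) : Int) := rfl
      rw [show ((d : Int)) = (((d : Nat) : Int)) from rfl, PySem.List.pyGetD_natCast]
      exact AW_getD_congr ws _ T d hpos (by rw [length_identity, hTlen])
        (by rw [getD_identity _ _ hdM, hT_id d hband.1 hband.2])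
    · have hTout := hT_out d hdM hband
      have hTr := hT_rng d hdM
      have hRHS : (AW ws T).getD d 0 = T.getD d 0 := by
        apply getD_AW_not_mem
        intro w hw
        have := hws_dst w hw
        exact ⟨hpos w hw, by omega⟩
      rw [hRHS]
      have hy0 : (0 : Int) ≤ T.getD d 0 := hTr.1
      have hylt : T.getD d 0 < ((AW ws (identity_perm (6 * N * N))).length : Int) := by
        rw [hRlen]; omega
      rw [PySem.List.pyGetD_eq_getElem _ _ hy0 hylt,
          ← List.getD_eq_getElem _ 0 (by omega : (T.getD d 0).toNat < (AW ws (identity_perm (6 * N * N))).length)]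
      have hnot : ∀ w ∈ ws, 0 ≤ w.1 ∧ w.1 ≠ ((T.getD d 0).toNat : Int) := by
        intro w hw
        have a := hws_dst w hw
        have : ((T.getD d 0).toNat : Int) = T.getD d 0 := by omega
        exact ⟨hpos w hw, by omega⟩
      rw [getD_AW_not_mem _ _ _ hnot, getD_identity _ _ (by omega)]
      omega

def sideW (N : Int) : List (Int × Int) :=
  (grid N).flatMap fun p =>
    [(pyID 1 p.1 p.2 N, pyID 4 p.1 p.2 N), (pyID 2 p.1 p.2 N, pyID 1 p.1 p.2 N),
     (pyID 3 p.1 p.2 N, pyID 2 p.1 p.2 N), (pyID 4 p.1 p.2 N, pyID 3 p.1 p.2 N)]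

theorem loopA_eq (N : Int) (P0 : List Int) :
    (PySem.List.pyRange 1 (N + 1) 1).foldl (fun P i =>
      (PySem.List.pyRange 1 (N + 1) 1).foldl (fun P j =>
        PySem.List.pySetD (PySem.List.pySetD (PySem.List.pySetD (PySem.List.pySetD P
          (pyID 1 i j N) (pyID 4 i j N)) (pyID 2 i j N) (pyID 1 i j N))
          (pyID 3 i j N) (pyID 2 i j N)) (pyID 4 i j N) (pyID 3 i j N)) P) P0
    = AW (sideW N) P0 := by
  have h1 : (PySem.List.pyRange 1 (N + 1) 1).foldl (fun P i =>
      (PySem.List.pyRange 1 (N + 1) 1).foldl (fun P j =>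
        PySem.List.pySetD (PySem.List.pySetD (PySem.List.pySetD (PySem.List.pySetD P
          (pyID 1 i j N) (pyID 4 i j N)) (pyID 2 i j N) (pyID 1 i j N))
          (pyID 3 i j N) (pyID 2 i j N)) (pyID 4 i j N) (pyID 3 i j N)) P) P0
    = (PySem.List.pyRange 1 (N + 1) 1).foldl (fun P i =>
        AW ((PySem.List.pyRange 1 (N + 1) 1).flatMap fun j =>
          [(pyID 1 i j N, pyID 4 i j N), (pyID 2 i j N, pyID 1 i j N),
           (pyID 3 i j N, pyID 2 i j N), (pyID 4 i j N, pyID 3 i j N)]) P) P0 := by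
    apply PySem.List.foldl_congr_mem
    intro P i _
    show (PySem.List.pyRange 1 (N + 1) 1).foldl (fun P j =>
        AW [(pyID 1 i j N, pyID 4 i j N), (pyID 2 i j N, pyID 1 i j N),
            (pyID 3 i j N, pyID 2 i j N), (pyID 4 i j N, pyID 3 i j N)] P) P = _
    rw [foldl_AW]
  rw [h1, foldl_AW]
  unfold sideW grid
  rw [List.flatMap_assoc]
  simp only [List.flatMap_map]

def rot5W (N : Int) : List (Int × Int) :=
  (grid N).flatMap fun p => [(pyID 5 p.2 (N - p.1 + 1) N, pyID 5 p.1 p.2 N)]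

def rot6W (N : Int) : List (Int × Int) :=
  (grid N).flatMap fun p => [(pyID 6 (N - p.2 + 1) p.1 N, pyID 6 p.1 p.2 N)]

theorem rot5_eq (N : Int) :
    rotate_face_perm 5 "CW" N = AW (rot5W N) (identity_perm (6 * N * N)) := by
  unfold rotate_face_perm
  simp only [String.reduceEq, ite_true, ite_false]
  have h1 : ∀ (i : Int) (P : List Int),
      (PySem.List.pyRange 1 (N + 1) 1).foldl (fun P j =>
        PySem.List.pySetD P (pyID 5 j (N - i + 1) N) (pyID 5 i j N)) P
      = AW ((PySem.List.pyRange 1 (N + 1) 1).flatMap fun j =>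
          [(pyID 5 j (N - i + 1) N, pyID 5 i j N)]) P := by
    intro i P
    rw [show (fun (P : List Int) (j : Int) =>
        PySem.List.pySetD P (pyID 5 j (N - i + 1) N) (pyID 5 i j N))
      = (fun P j => AW [(pyID 5 j (N - i + 1) N, pyID 5 i j N)] P) from rfl, foldl_AW]
  simp only [h1]
  rw [foldl_AW]
  unfold rot5W grid
  rw [List.flatMap_assoc]
  simp only [List.flatMap_map]

theorem rot6_eq (N : Int) :
    rotate_face_perm 6 "CCW" N = AW (rot6W N) (identity_perm (6 * N * N)) := by
  unfold rotate_face_perm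
  simp only [String.reduceEq, ite_true, ite_false]
  have h1 : ∀ (i : Int) (P : List Int),
      (PySem.List.pyRange 1 (N + 1) 1).foldl (fun P j =>
        PySem.List.pySetD P (pyID 6 (N - j + 1) i N) (pyID 6 i j N)) P
      = AW ((PySem.List.pyRange 1 (N + 1) 1).flatMap fun j =>
          [(pyID 6 (N - j + 1) i N, pyID 6 i j N)]) P := by
    intro i P
    rw [show (fun (P : List Int) (j : Int) =>
        PySem.List.pySetD P (pyID 6 (N - j + 1) i N) (pyID 6 i j N))
      = (fun P j => AW [(pyID 6 (N - j + 1) i N, pyID 6 i j N)] P) from rfl, foldl_AW]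
  simp only [h1]
  rw [foldl_AW]
  unfold rot6W grid
  rw [List.flatMap_assoc]
  simp only [List.flatMap_map]

theorem sideW_mem (N : Int) (w : Int × Int) (h : w ∈ sideW N) :
    0 ≤ w.1 ∧ w.1 < 4 * N * N ∧ 0 ≤ w.2 ∧ w.2 < 4 * N * N := by
  unfold sideW at h
  rw [List.mem_flatMap] at h
  obtain ⟨p, hp, hw⟩ := h
  obtain ⟨h1, h2, h3, h4⟩ := mem_grid N p hp
  simp only [List.mem_cons, List.not_mem_nil, or_false] at hw
  have H : ∀ f : Int, 1 ≤ f → f ≤ 4 → 0 ≤ pyID f p.1 p.2 N ∧ pyID f p.1 p.2 N < 4 * N * N := by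
    intro f hf1 hf4
    have hb := pyID_bounds N f p.1 p.2 h1 h2 h3 h4
    constructor
    · nlinarith [hb.1]
    · nlinarith [hb.2]
  rcases hw with rfl | rfl | rfl | rfl
  · exact ⟨(H 1 (by norm_num) (by norm_num)).1, (H 1 (by norm_num) (by norm_num)).2,
           (H 4 (by norm_num) (by norm_num)).1, (H 4 (by norm_num) (by norm_num)).2⟩
  · exact ⟨(H 2 (by norm_num) (by norm_num)).1, (H 2 (by norm_num) (by norm_num)).2,
           (H 1 (by norm_num) (by norm_num)).1, (H 1 (by norm_num) (by norm_num)).2⟩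
  · exact ⟨(H 3 (by norm_num) (by norm_num)).1, (H 3 (by norm_num) (by norm_num)).2,
           (H 2 (by norm_num) (by norm_num)).1, (H 2 (by norm_num) (by norm_num)).2⟩
  · exact ⟨(H 4 (by norm_num) (by norm_num)).1, (H 4 (by norm_num) (by norm_num)).2,
           (H 3 (by norm_num) (by norm_num)).1, (H 3 (by norm_num) (by norm_num)).2⟩

theorem rot5W_mem (N : Int) (w : Int × Int) (h : w ∈ rot5W N) :
    4 * N * N ≤ w.1 ∧ w.1 < 5 * N * N ∧ 4 * N * N ≤ w.2 ∧ w.2 < 5 * N * N := by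
  unfold rot5W at h
  rw [List.mem_flatMap] at h
  obtain ⟨p, hp, hw⟩ := h
  obtain ⟨h1, h2, h3, h4⟩ := mem_grid N p hp
  simp only [List.mem_cons, List.not_mem_nil, or_false] at hw
  subst hw
  have hd := pyID_bounds N 5 p.2 (N - p.1 + 1) h3 h4 (by omega) (by omega)
  have hv := pyID_bounds N 5 p.1 p.2 h1 h2 h3 h4
  constructor
  · have := hd.1; nlinarith
  constructor
  · have := hd.2; nlinarith
  constructor
  · have := hv.1; nlinarith
  · have := hv.2; nlinarith

theorem rot6W_mem (N : Int) (w : Int × Int) (h : w ∈ rot6W N) :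
    5 * N * N ≤ w.1 ∧ w.1 < 6 * N * N ∧ 5 * N * N ≤ w.2 ∧ w.2 < 6 * N * N := by
  unfold rot6W at h
  rw [List.mem_flatMap] at h
  obtain ⟨p, hp, hw⟩ := h
  obtain ⟨h1, h2, h3, h4⟩ := mem_grid N p hp
  simp only [List.mem_cons, List.not_mem_nil, or_false] at hw
  subst hw
  have hd := pyID_bounds N 6 (N - p.2 + 1) p.1 (by omega) (by omega) h1 h2
  have hv := pyID_bounds N 6 p.1 p.2 h1 h2 h3 h4
  constructor
  · have := hd.1; nlinarith
  constructor
  · have := hd.2; nlinarith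
  constructor
  · have := hv.1; nlinarith
  · have := hv.2; nlinarith

theorem loopB_eq (N : Int) :
    perm_rotate_front_alt N
      = AW ((grid N).flatMap fun p =>
          [(pyID 1 p.1 p.2 N, pyID 4 p.1 p.2 N), (pyID 2 p.1 p.2 N, pyID 1 p.1 p.2 N),
           (pyID 3 p.1 p.2 N, pyID 2 p.1 p.2 N), (pyID 4 p.1 p.2 N, pyID 3 p.1 p.2 N),
           (pyID 5 p.2 (N - p.1 + 1) N, pyID 5 p.1 p.2 N),
           (pyID 6 (N - p.2 + 1) p.1 N, pyID 6 p.1 p.2 N)])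
        (identity_perm (6 * N * N)) := by
  have h0 : perm_rotate_front_alt N
      = (PySem.List.pyRange 1 (N + 1) 1).foldl (fun P i =>
          (PySem.List.pyRange 1 (N + 1) 1).foldl (fun P j =>
            AW [(pyID 1 i j N, pyID 4 i j N), (pyID 2 i j N, pyID 1 i j N),
                (pyID 3 i j N, pyID 2 i j N), (pyID 4 i j N, pyID 3 i j N),
                (pyID 5 j (N - i + 1) N, pyID 5 i j N),
                (pyID 6 (N - j + 1) i N, pyID 6 i j N)] P) P)
        (identity_perm (6 * N * N)) := rfl
  rw [h0]
  have h1 : ∀ (i : Int) (P : List Int),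
      (PySem.List.pyRange 1 (N + 1) 1).foldl (fun P j =>
        AW [(pyID 1 i j N, pyID 4 i j N), (pyID 2 i j N, pyID 1 i j N),
            (pyID 3 i j N, pyID 2 i j N), (pyID 4 i j N, pyID 3 i j N),
            (pyID 5 j (N - i + 1) N, pyID 5 i j N),
            (pyID 6 (N - j + 1) i N, pyID 6 i j N)] P) P
      = AW ((PySem.List.pyRange 1 (N + 1) 1).flatMap fun j =>
          [(pyID 1 i j N, pyID 4 i j N), (pyID 2 i j N, pyID 1 i j N),
           (pyID 3 i j N, pyID 2 i j N), (pyID 4 i j N, pyID 3 i j N),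
           (pyID 5 j (N - i + 1) N, pyID 5 i j N),
           (pyID 6 (N - j + 1) i N, pyID 6 i j N)]) P := by
    intro i P
    rw [foldl_AW]
  simp only [h1]
  rw [foldl_AW]
  unfold grid
  rw [List.flatMap_assoc]
  simp only [List.flatMap_map]

theorem perm_rotate_front_eq_alt (N : Int) : perm_rotate_front N = perm_rotate_front_alt N := by
  have hKK : (0 : Int) ≤ N * N := mul_self_nonneg N
  have e4 : 4 * N * N = 4 * (N * N) := by ring
  have e5 : 5 * N * N = 5 * (N * N) := by ring
  have e6 : 6 * N * N = 6 * (N * N) := by ring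
  set idL := identity_perm (6 * N * N) with hidL
  set S := AW (sideW N) idL with hS
  have hSlen : S.length = (6 * N * N).toNat := by rw [hS, length_AW, hidL, length_identity]
  have hS_high : ∀ d : Nat, 4 * N * N ≤ (d : Int) → d < (6 * N * N).toNat → S.getD d 0 = (d : Int) := by
    intro d hd hdM
    rw [hS, getD_AW_not_mem _ _ _ (fun w hw => ⟨(sideW_mem N w hw).1,
      by have := (sideW_mem N w hw).2.1; omega⟩), hidL, getD_identity _ _ hdM]
  have hS_rng : ∀ d : Nat, d < (6 * N * N).toNat → 0 ≤ S.getD d 0 ∧ S.getD d 0 < 6 * N * N := by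
    intro d hdM
    rcases getD_AW_cases (sideW N) idL d with hc | ⟨w, hw, hv⟩
    · rw [hS, hc, hidL, getD_identity _ _ hdM]; omega
    · have := sideW_mem N w hw; rw [hS, hv]; omega
  have hS_out5 : ∀ d : Nat, d < (6 * N * N).toNat → ¬(4 * N * N ≤ (d : Int) ∧ (d : Int) < 5 * N * N) →
      ¬(4 * N * N ≤ S.getD d 0 ∧ S.getD d 0 < 5 * N * N) := by
    intro d hdM hband
    rcases getD_AW_cases (sideW N) idL d with hc | ⟨w, hw, hv⟩
    · rw [hS, hc, hidL, getD_identity _ _ hdM]; exact hband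
    · have := sideW_mem N w hw; rw [hS, hv]; omega
  have hS_out6 : ∀ d : Nat, d < (6 * N * N).toNat → ¬(5 * N * N ≤ (d : Int) ∧ (d : Int) < 6 * N * N) →
      ¬(5 * N * N ≤ S.getD d 0 ∧ S.getD d 0 < 6 * N * N) := by
    intro d hdM hband
    rcases getD_AW_cases (sideW N) idL d with hc | ⟨w, hw, hv⟩
    · rw [hS, hc, hidL, getD_identity _ _ hdM]; exact hband
    · have := sideW_mem N w hw; rw [hS, hv]; omega
  have stage1 : compose (AW (rot5W N) idL) S = AW (rot5W N) S := by
    apply compose_rot_eq_AW N S (rot5W N) (4 * N * N) (5 * N * N) hSlen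
    · intro w hw; have := rot5W_mem N w hw; omega
    · omega
    · intro d h1 h2; exact hS_high d h1 (by omega)
    · exact hS_rng
    · exact hS_out5
  set T2 := AW (rot5W N) S with hT2
  have hT2len : T2.length = (6 * N * N).toNat := by rw [hT2, length_AW, hSlen]
  have hT2_high : ∀ d : Nat, 5 * N * N ≤ (d : Int) → d < (6 * N * N).toNat → T2.getD d 0 = (d : Int) := by
    intro d hd hdM
    rw [hT2, getD_AW_not_mem _ _ _ (fun w hw => ⟨by have := rot5W_mem N w hw; omega,
      by have := rot5W_mem N w hw; omega⟩)]
    exact hS_high d (by omega) hdM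
  have hT2_rng : ∀ d : Nat, d < (6 * N * N).toNat → 0 ≤ T2.getD d 0 ∧ T2.getD d 0 < 6 * N * N := by
    intro d hdM
    rcases getD_AW_cases (rot5W N) S d with hc | ⟨w, hw, hv⟩
    · rw [hT2, hc]; exact hS_rng d hdM
    · have := rot5W_mem N w hw; rw [hT2, hv]; omega
  have hT2_out6 : ∀ d : Nat, d < (6 * N * N).toNat → ¬(5 * N * N ≤ (d : Int) ∧ (d : Int) < 6 * N * N) →
      ¬(5 * N * N ≤ T2.getD d 0 ∧ T2.getD d 0 < 6 * N * N) := by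
    intro d hdM hband
    rcases getD_AW_cases (rot5W N) S d with hc | ⟨w, hw, hv⟩
    · rw [hT2, hc]; exact hS_out6 d hdM hband
    · have := rot5W_mem N w hw; rw [hT2, hv]; omega
  have stage2 : compose (AW (rot6W N) idL) T2 = AW (rot6W N) T2 := by
    apply compose_rot_eq_AW N T2 (rot6W N) (5 * N * N) (6 * N * N) hT2len
    · intro w hw; have := rot6W_mem N w hw; omega
    · omega
    · intro d h1 h2; exact hT2_high d h1 (by omega)
    · exact hT2_rng
    · exact hT2_out6
  -- A side
  have hA : perm_rotate_front N
      = compose (rotate_face_perm 6 "CCW" N)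
          (compose (rotate_face_perm 5 "CW" N)
            ((PySem.List.pyRange 1 (N + 1) 1).foldl (fun P i =>
              (PySem.List.pyRange 1 (N + 1) 1).foldl (fun P j =>
                PySem.List.pySetD (PySem.List.pySetD (PySem.List.pySetD (PySem.List.pySetD P
                  (pyID 1 i j N) (pyID 4 i j N)) (pyID 2 i j N) (pyID 1 i j N))
                  (pyID 3 i j N) (pyID 2 i j N)) (pyID 4 i j N) (pyID 3 i j N)) P)
              (identity_perm (6 * N * N)))) := rfl
  rw [hA, loopA_eq, rot5_eq, rot6_eq, ← hidL, ← hS, stage1, stage2]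
  -- B side
  rw [loopB_eq]
  have hsplit1 : AW ((grid N).flatMap fun p =>
      [(pyID 1 p.1 p.2 N, pyID 4 p.1 p.2 N), (pyID 2 p.1 p.2 N, pyID 1 p.1 p.2 N),
       (pyID 3 p.1 p.2 N, pyID 2 p.1 p.2 N), (pyID 4 p.1 p.2 N, pyID 3 p.1 p.2 N),
       (pyID 5 p.2 (N - p.1 + 1) N, pyID 5 p.1 p.2 N),
       (pyID 6 (N - p.2 + 1) p.1 N, pyID 6 p.1 p.2 N)]) idL
    = AW ((grid N).flatMap fun p =>
        [(pyID 5 p.2 (N - p.1 + 1) N, pyID 5 p.1 p.2 N)] ++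
        [(pyID 6 (N - p.2 + 1) p.1 N, pyID 6 p.1 p.2 N)]) (AW (sideW N) idL) := by
    rw [show (fun (p : Int × Int) =>
        [(pyID 1 p.1 p.2 N, pyID 4 p.1 p.2 N), (pyID 2 p.1 p.2 N, pyID 1 p.1 p.2 N),
         (pyID 3 p.1 p.2 N, pyID 2 p.1 p.2 N), (pyID 4 p.1 p.2 N, pyID 3 p.1 p.2 N),
         (pyID 5 p.2 (N - p.1 + 1) N, pyID 5 p.1 p.2 N),
         (pyID 6 (N - p.2 + 1) p.1 N, pyID 6 p.1 p.2 N)])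
      = (fun p =>
        ([(pyID 1 p.1 p.2 N, pyID 4 p.1 p.2 N), (pyID 2 p.1 p.2 N, pyID 1 p.1 p.2 N),
          (pyID 3 p.1 p.2 N, pyID 2 p.1 p.2 N), (pyID 4 p.1 p.2 N, pyID 3 p.1 p.2 N)] ++
         ([(pyID 5 p.2 (N - p.1 + 1) N, pyID 5 p.1 p.2 N)] ++
          [(pyID 6 (N - p.2 + 1) p.1 N, pyID 6 p.1 p.2 N)]))) from rfl]
    rw [AW_flatMap_split (grid N) _ _ ?_ idL]
    · rfl
    · intro x hx y hy w hw w' hw'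
      have hws : w ∈ sideW N := by
        unfold sideW; rw [List.mem_flatMap]; exact ⟨x, hx, hw⟩
      have hw56 : (4 * N * N ≤ w'.1 ∧ w'.1 < 6 * N * N) := by
        rcases List.mem_append.mp hw' with h5 | h6
        · have : w' ∈ rot5W N := by unfold rot5W; rw [List.mem_flatMap]; exact ⟨y, hy, h5⟩
          have := rot5W_mem N _ this; omega
        · have : w' ∈ rot6W N := by unfold rot6W; rw [List.mem_flatMap]; exact ⟨y, hy, h6⟩
          have := rot6W_mem N _ this; omega
      have := sideW_mem N w hws
      exact ⟨this.1, by omega, by omega⟩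
  rw [hsplit1, ← hS]
  rw [AW_flatMap_split (grid N) _ _ ?_ S]
  · rfl
  · intro x hx y hy w hw w' hw'
    have h5 : w ∈ rot5W N := by unfold rot5W; rw [List.mem_flatMap]; exact ⟨x, hx, hw⟩
    have h6 : w' ∈ rot6W N := by unfold rot6W; rw [List.mem_flatMap]; exact ⟨y, hy, hw'⟩
    have a5 := rot5W_mem N _ h5
    have a6 := rot6W_mem N _ h6
    exact ⟨by omega, by omega, by omega⟩

-- ===== VERDICT (by name: the statement is the Claim_ definition above) =====
theorem perm_rotate_front_spec : Claim_equal_perm_rotate_front := by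
  intro N _ _
  unfold Spec_perm_rotate_front
  exact perm_rotate_front_eq_alt N
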